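-- pv_equiv track=rewrite | github.com/joyce99/Xie-Yuxin | UKEM/scripts/birchZH.py | get_class_num
-- ===== SOURCE A (Python) =====
-- import operator
--
-- def get_class_num(labels):
--     class_num = dict()
--     for label in labels:
--         if label not in class_num:
--             class_num[label] = 1
--         else:
--             class_num[label] += 1
--     class_num = dict(sorted(class_num.items(), key=operator.itemgetter(0)))
--     return class_num
-- ===== SOURCE B (Python) =====
-- def get_class_num(labels):
--     # sort first, then one run-length pass over the sorted sequence
--     s = sorted(labels)
--     class_num = {}
--     i = 0
--     n = len(s)
--     while i < n:
--         j = i + 1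
--         while j < n and s[j] == s[i]:
--             j += 1
--         class_num[s[i]] = j - i
--         i = j
--     return class_num
-- ===== Notes on version B (the rewrite author's own statement) =====
-- stated objective: alternative
-- what changed: Instead of counting into a dict and then sorting the dict items by key, B sorts the labels once and does a single run-length pass over the sorted sequence, inserting each (label, run length) directly in key order.
import Mathlib
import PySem

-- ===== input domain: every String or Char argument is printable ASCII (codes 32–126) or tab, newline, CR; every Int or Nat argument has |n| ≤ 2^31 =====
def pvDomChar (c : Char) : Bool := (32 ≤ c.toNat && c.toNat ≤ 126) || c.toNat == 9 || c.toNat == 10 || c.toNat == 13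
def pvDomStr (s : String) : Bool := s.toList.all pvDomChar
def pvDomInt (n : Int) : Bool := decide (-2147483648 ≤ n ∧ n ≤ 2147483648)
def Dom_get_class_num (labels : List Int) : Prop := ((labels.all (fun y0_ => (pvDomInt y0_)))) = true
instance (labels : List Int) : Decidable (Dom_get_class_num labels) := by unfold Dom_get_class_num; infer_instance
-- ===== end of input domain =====

-- B replaces A's count-into-a-dict-then-sort-the-items with a single run-length pass
-- over the sorted labels (objective: alternative decomposition, same result).

-- ===== PORT A =====
def get_class_num (labels : List Int) : List (Int × Int) :=
  let class_num := labels.foldl (fun d label =>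
      if d.contains label = false then d.insert label 1
      else d.insert label (d.getD label 0 + 1)) PySem.Dict.empty
  (PySem.Dict.ofList (PySem.List.sorted class_num.items (fun p => p.1))).items

-- ===== PORT B =====
-- inner `while n < len(s) and s[n] == k: n += 1` of Source B: length of the leading run of k in the tail
def runLen (k : Int) : List Int → Nat
  | [] => 0
  | x :: xs => if x = k then runLen k xs + 1 else 0

-- outer `while s:` loop of Source B: emit (s[0], n) and continue on s[n:]
def groupRuns : List Int → List (Int × Int)
  | [] => []
  | x :: xs =>
      (x, ((runLen x xs + 1 : Nat) : Int)) :: groupRuns (xs.drop (runLen x xs))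
  termination_by s => s.length
  decreasing_by simp [List.length_drop]

def get_class_num_alt (labels : List Int) : List (Int × Int) :=
  groupRuns (PySem.List.sorted labels (fun x => x))

-- ===== PRECONDITION & SPEC =====
def Spec_get_class_num (labels : List Int) (out : List (Int × Int)) : Prop := out = get_class_num_alt labels
instance (labels : List Int) (out : List (Int × Int)) : Decidable (Spec_get_class_num labels out) := by unfold Spec_get_class_num; infer_instance

-- ===== CLAIM (what is proved, stated in full; the proofs are below) =====
def Claim_equal_get_class_num : Prop := ∀ (labels : List Int), Dom_get_class_num labels → Spec_get_class_num labels (get_class_num labels)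

-- ===== LEMMAS AND PROOFS =====

theorem runLen_take (k : Int) (xs : List Int) :
    xs.take (runLen k xs) = List.replicate (runLen k xs) k := by
  induction xs with
  | nil => simp [runLen]
  | cons x xs ih =>
    by_cases h : x = k
    · simp [runLen, h, List.replicate_succ, ih]
    · simp [runLen, h]

theorem runLen_drop_head_ne (k : Int) (xs : List Int) (y : Int) (t : List Int)
    (h : xs.drop (runLen k xs) = y :: t) : y ≠ k := by
  induction xs with
  | nil => simp [runLen] at h
  | cons x xs ih =>
    by_cases hx : x = k
    · simp [runLen, hx] at h; exact ih h
    · simp [runLen, hx] at h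
      intro hy; exact hx (h.1 ▸ hy)

-- every element after the leading run of the head is strictly larger than the head
theorem drop_runLen_gt (x : Int) (xs : List Int)
    (hs : (x :: xs).Pairwise (· ≤ ·)) :
    ∀ z ∈ xs.drop (runLen x xs), x < z := by
  intro z hz
  rcases ht : xs.drop (runLen x xs) with _ | ⟨y, t⟩
  · simp [ht] at hz
  · rw [ht] at hz
    have hyx : y ≠ x := runLen_drop_head_ne x xs y t ht
    have hxle : ∀ w ∈ xs, x ≤ w := (List.pairwise_cons.1 hs).1
    have hymem : y ∈ xs := by
      have : y ∈ xs.drop (runLen x xs) := by simp [ht]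
      exact List.mem_of_mem_drop this
    have hxy : x < y := lt_of_le_of_ne (hxle y hymem) (Ne.symm hyx)
    rcases List.mem_cons.1 hz with rfl | hz'
    · exact hxy
    · have hpt : (y :: t).Pairwise (· ≤ ·) := by
        rw [← ht]
        exact ((List.pairwise_cons.1 hs).2).sublist (List.drop_sublist _ _)
      exact lt_of_lt_of_le hxy ((List.pairwise_cons.1 hpt).1 z hz')

-- characterisation of the run-length pass on a sorted list
theorem groupRuns_spec (s : List Int) (hs : s.Pairwise (· ≤ ·)) :
    (∀ p ∈ groupRuns s, p.1 ∈ s ∧ p.2 = (s.count p.1 : Int)) ∧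
    (∀ k ∈ s, k ∈ (groupRuns s).map Prod.fst) ∧
    (groupRuns s).Pairwise (fun a b => a.1 < b.1) := by
  induction s using groupRuns.induct with
  | case1 => simp [groupRuns]
  | case2 x xs ih =>
    have hgt : ∀ z ∈ xs.drop (runLen x xs), x < z := drop_runLen_gt x xs hs
    have hst : (xs.drop (runLen x xs)).Pairwise (· ≤ ·) :=
      ((List.pairwise_cons.1 hs).2).sublist (List.drop_sublist _ _)
    obtain ⟨ihc, ihm, ihp⟩ := ih hst
    have hsplit : xs = List.replicate (runLen x xs) x ++ xs.drop (runLen x xs) := by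
      conv_lhs => rw [← List.take_append_drop (runLen x xs) xs]
      rw [runLen_take]
    have hnotmem : x ∉ xs.drop (runLen x xs) := fun hm => lt_irrefl x (hgt x hm)
    constructor
    · intro p hp
      rw [groupRuns] at hp
      rcases List.mem_cons.1 hp with rfl | hp'
      · constructor
        · simp
        · have : (x :: xs).count x = runLen x xs + 1 := by
            rw [List.count_cons_self]
            conv_lhs => rw [hsplit]
            rw [List.count_append, List.count_replicate,
              List.count_eq_zero_of_not_mem hnotmem]
            simp
          simp [this]
      · obtain ⟨hmem, hcnt⟩ := ihc p hp'
        have hxp : x < p.1 := hgt p.1 hmem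
        constructor
        · exact List.mem_cons_of_mem x (List.mem_of_mem_drop hmem)
        · have h1 : (x :: xs).count p.1 = (xs.drop (runLen x xs)).count p.1 := by
            rw [List.count_cons_of_ne (by omega)]
            conv_lhs => rw [hsplit]
            simp [List.count_append, List.count_replicate,
              show x ≠ p.1 from by omega]
          rw [h1]; exact hcnt
    · constructor
      · intro k hk
        rcases List.mem_cons.1 hk with rfl | hk'
        · simp [groupRuns]
        · rw [hsplit] at hk'
          rcases List.mem_append.1 hk' with hrep | hdrop
          · have : k = x := List.eq_of_mem_replicate hrep
            simp [groupRuns, this]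
          · have := ihm k hdrop
            rw [groupRuns]; simp only [List.map_cons, List.mem_cons]
            exact Or.inr this
      · rw [groupRuns]
        refine List.pairwise_cons.2 ⟨?_, ihp⟩
        intro q hq
        exact hgt q.1 (ihc q hq).1

theorem get_class_num_eq (labels : List Int) :
    get_class_num labels = get_class_num_alt labels := by
  -- A's counting loop is exactly the insert-getD-add-one counter loop
  have hstep : (fun (d : PySem.Dict Int Int) label =>
      if d.contains label = false then d.insert label 1
      else d.insert label (d.getD label 0 + 1)) =
      (fun (d : PySem.Dict Int Int) x => d.insert x (d.getD x 0 + 1)) := by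
    funext d x
    by_cases h : d.contains x
    · simp [h]
    · have h' : d.contains x = false := by simpa using h
      simp [h', PySem.Dict.getD_of_not_contains d 0 h']
  simp only [get_class_num, get_class_num_alt]
  rw [hstep, PySem.Dict.foldl_insert_getD_add_one_eq_counter,
    PySem.Dict.items_counter]
  set s := PySem.List.sorted labels (fun x => x) with hsdef
  have hperm : s.Perm labels := PySem.List.sorted_perm labels (fun x => x) false
  have hsorted : s.Pairwise (· ≤ ·) := by
    have := PySem.List.sorted_pairwise labels (fun x => x)
    simpa using this
  obtain ⟨hc, hm, hp⟩ := groupRuns_spec s hsorted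
  set g := groupRuns s with hgdef
  set items := (PySem.Set.ofList labels).map
      (fun k => (k, (List.count k labels : Int))) with hidef
  -- g is a permutation of the counter's items
  have hgnodup : g.Nodup := hp.imp (fun {a b} h => by
    intro he; rw [he] at h; exact lt_irrefl _ h)
  have hinodup : items.Nodup := by
    refine (PySem.Set.nodup_ofList labels).map ?_
    intro a b h
    exact congrArg Prod.fst h
  have hgperm : g.Perm items := by
    rw [List.perm_ext_iff_of_nodup hgnodup hinodup]
    intro p
    constructor
    · intro hpg
      obtain ⟨hmem, hcnt⟩ := hc p hpg
      have hmeml : p.1 ∈ labels := hperm.mem_iff.1 hmem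
      have : p.2 = (List.count p.1 labels : Int) := by
        rw [hcnt, hperm.count_eq]
      rw [hidef]
      refine List.mem_map.2 ⟨p.1, (PySem.Set.mem_ofList labels p.1).2 hmeml, ?_⟩
      exact Prod.ext rfl this.symm
    · intro hpi
      rw [hidef] at hpi
      obtain ⟨k, hk, hke⟩ := List.mem_map.1 hpi
      have hkl : k ∈ labels := (PySem.Set.mem_ofList labels k).1 hk
      have hks : k ∈ s := hperm.mem_iff.2 hkl
      obtain ⟨q, hqg, hq1⟩ := List.mem_map.1 (hm k hks)
      have hq2 : q.2 = (List.count k labels : Int) := by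
        have := (hc q hqg).2
        rw [this, hq1, hperm.count_eq]
      have : q = p := by
        rw [← hke]; exact Prod.ext (by rw [hq1]) (by rw [hq2])
      rw [← this]; exact hqg
  -- the sorted-by-key items list IS g
  have hsortedeq : PySem.List.sorted items (fun p => p.1) = g :=
    PySem.List.sorted_eq_of_perm_of_pairwise_lt items g (fun p => p.1) hgperm hp
  rw [hsortedeq]
  -- dict() of a strictly-key-increasing pair list keeps it as its items
  have hkeysnodup : (g.map Prod.fst).Nodup := by
    exact (List.pairwise_map).2 (hp.imp (fun {a b} h => by omega))
  have : PySem.Dict.ofList g =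
      g.foldl (fun d p => d.insert p.1 p.2) PySem.Dict.empty := rfl
  rw [this]
  rw [PySem.Dict.items_foldl_insert_fresh g Prod.fst Prod.snd PySem.Dict.empty
    (fun a _ => by simp) hkeysnodup]
  simp [PySem.Dict.empty]

-- ===== VERDICT (by name: the statement is the Claim_ definition above) =====
theorem get_class_num_spec : Claim_equal_get_class_num := by
  intro labels _
  unfold Spec_get_class_num
  exact get_class_num_eq labels
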